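-- pv_equiv track=rewrite | github.com/IotsertsvaIo/Goa-homework | Day 27/homework/homework6.py | duplicator
-- ===== SOURCE A (Python) =====
-- def duplicator(num):
--     number = []
--     for i in num:
--         if i == num[i]:
--             number.append(i)
--         else:
--             return number
--
--     return number
-- ===== SOURCE B (Python) =====
-- def duplicator(num):
--     # Recursive decomposition: descend index by index, building the result
--     # front-to-back on the way out of the recursion (cons on return),
--     # instead of A's iterative loop with an accumulator and early return.
--     def go(k):
--         if k >= len(num):
--             return []
--         v = num[k]
--         if v != num[v]:
--             return []
--         return [v] + go(k + 1)
--     return go(0)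
-- ===== Notes on version B (the rewrite author's own statement) =====
-- stated objective: alternative
-- what changed: A iterates with a mutable accumulator list and an early return inside the loop; B is a recursive function on the index that builds the result by consing on the way back out of the recursion, with no accumulator or mutation.
import Mathlib
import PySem

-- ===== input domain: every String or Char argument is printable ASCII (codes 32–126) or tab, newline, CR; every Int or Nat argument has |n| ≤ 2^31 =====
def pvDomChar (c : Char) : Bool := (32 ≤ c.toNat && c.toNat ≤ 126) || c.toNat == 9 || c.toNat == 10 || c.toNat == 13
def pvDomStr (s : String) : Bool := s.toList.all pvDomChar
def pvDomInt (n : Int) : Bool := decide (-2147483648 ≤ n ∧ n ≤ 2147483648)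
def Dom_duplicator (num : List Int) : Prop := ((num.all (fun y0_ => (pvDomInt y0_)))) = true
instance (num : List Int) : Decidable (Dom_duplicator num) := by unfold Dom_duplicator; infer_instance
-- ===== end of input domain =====

-- B replaces A's iterative loop (mutable accumulator, early return) with a recursive
-- function on the index that builds the result by consing on the way out of the recursion.

-- ===== PORT A =====
-- the for-loop of A: `number` is the accumulator, the second list the remaining elements
def duplicatorGo (num : List Int) (number : List Int) : List Int → List Int
  | [] => number
  | i :: rest =>
    match PySem.List.pyGet? num i with
    | some v => if i = v then duplicatorGo num (number ++ [i]) rest else number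
    | none => number    -- num[i] raises IndexError in Python; excluded by Pre_duplicator

def duplicator (num : List Int) : List Int :=
  duplicatorGo num [] num

-- ===== PORT B =====
-- B's recursive helper go(k): [] at the end or at the first failing element,
-- otherwise cons the element onto the recursive result for k+1
def dupGo (num : List Int) (k : Nat) : List Int :=
  if _h : num.length ≤ k then []
  else
    match PySem.List.pyGet? num (k : Int) with
    | none => []        -- unreachable: k is in range here
    | some v =>
      match PySem.List.pyGet? num v with
      | none => []      -- num[v] raises IndexError in Python; excluded by Pre_duplicator
      | some w => if v ≠ w then [] else v :: dupGo num (k + 1)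
termination_by num.length - k

def duplicator_alt (num : List Int) : List Int :=
  dupGo num 0

-- ===== PRECONDITION & SPEC =====
-- Pre_ excludes exactly the inputs on which Python A (and B) raises IndexError:
-- those where the scan reaches an element that is out of range as an index into num.
def Pre_duplicator (num : List Int) : Prop :=
  ∀ k, k < num.length →
    (∀ j, j < k → PySem.Raise.InRange num.length (num.getD j 0) ∧
        num.getD j 0 = PySem.List.pyGetD num (num.getD j 0) 0) →
    PySem.Raise.InRange num.length (num.getD k 0)
instance (num : List Int) : Decidable (Pre_duplicator num) := by unfold Pre_duplicator; infer_instance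

def pvWitness_duplicator : List Int := ([0, 1, 2])

def Spec_duplicator (num : List Int) (out : List Int) : Prop := out = duplicator_alt num
instance (num : List Int) (out : List Int) : Decidable (Spec_duplicator num out) := by unfold Spec_duplicator; infer_instance

-- ===== CLAIM (what is proved, stated in full; the proofs are below) =====
def Claim_equal_duplicator : Prop := ∀ (num : List Int), Dom_duplicator num → Pre_duplicator num → Spec_duplicator num (duplicator num)

-- ===== LEMMAS AND PROOFS =====

lemma loop_eq_dupGo (num : List Int) :
    ∀ (n k : Nat) (acc : List Int), num.length - k = n →
      duplicatorGo num acc (num.drop k) = acc ++ dupGo num k := by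
  intro n
  induction n with
  | zero =>
    intro k acc hn
    have hk : num.length ≤ k := by omega
    rw [List.drop_eq_nil_of_le hk, dupGo, dif_pos hk]
    simp [duplicatorGo]
  | succ n ih =>
    intro k acc hn
    have hk : k < num.length := by omega
    rw [List.drop_eq_getElem_cons hk, duplicatorGo, dupGo, dif_neg (by omega)]
    rw [PySem.List.pyGet?_natCast, List.getElem?_eq_getElem hk]
    cases hv : PySem.List.pyGet? num num[k] with
    | none => simp [hv]
    | some v =>
      simp only [hv]
      by_cases h : num[k] = v
      · rw [if_pos h, if_neg (by simp [h])]
        rw [ih (k + 1) (acc ++ [num[k]]) (by omega)]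
        simp [h]
      · rw [if_neg h, if_pos h]
        simp

-- ===== VERDICT (by name: the statement is the Claim_ definition above) =====
theorem duplicator_spec : Claim_equal_duplicator := by
  intro num _ _
  unfold Spec_duplicator duplicator duplicator_alt
  have h := loop_eq_dupGo num (num.length - 0) 0 [] rfl
  simpa using h
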